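-- pv_equiv track=rewrite | github.com/pypi-data/pypi-mirror-385 | packages/bengal/bengal-0.1.3.tar.gz/bengal-0.1.3/bengal/autodoc/extractors/cli.py | _strip_examples_from_description
-- ===== SOURCE A (Python) =====
-- def _strip_examples_from_description(docstring: str) -> str:
--     """
--     Remove example blocks from docstring description.
--
--     Args:
--         docstring: Full docstring
--
--     Returns:
--         Description without Examples section
--     """
--     lines = docstring.split("\n")
--     description_lines = []
--
--     for line in lines:
--         stripped = line.strip()
--
--         # Stop at Examples section
--         if stripped.lower() in ("example:", "examples:", "usage:"):
--             break
--
--         description_lines.append(line)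
--
--     return "\n".join(description_lines).strip()
-- ===== SOURCE B (Python) =====
-- def _strip_examples_from_description(docstring: str) -> str:
--     # Scan the raw string by line-start positions with a tiny matcher instead of
--     # building a list of lines: cut the string at the start of the first header
--     # line ("example:"/"examples:"/"usage:" alone on its line, any case,
--     # surrounded by horizontal whitespace), then strip once.
--     ws = " \t\r\f\v"  # horizontal whitespace (everything str.strip removes except newlines)
--     n = len(docstring)
--
--     def header_at(i):
--         # does a pure header line start at position i?
--         j = i
--         while j < n and docstring[j] in ws:
--             j += 1
--         for kw in ("example:", "examples:", "usage:"):
--             if docstring[j:j + len(kw)].lower() == kw: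
--                 k = j + len(kw)
--                 while k < n and docstring[k] in ws:
--                     k += 1
--                 if k == n or docstring[k] == "\n":
--                     return True
--         return False
--
--     pos = 0
--     cut = None
--     while True:
--         if header_at(pos):
--             cut = pos
--             break
--         nl = docstring.find("\n", pos)
--         if nl == -1:
--             break
--         pos = nl + 1
--     return (docstring if cut is None else docstring[:cut]).strip()
-- ===== Notes on version B (the rewrite author's own statement) =====
-- stated objective: alternative
-- what changed: Instead of splitting into a list of lines, collecting them in a loop and joining them back, B scans the raw string over line-start positions with a small header-line matcher and cuts the original string once at the first header line, so no line list or rejoined copy is built.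
import Mathlib
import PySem

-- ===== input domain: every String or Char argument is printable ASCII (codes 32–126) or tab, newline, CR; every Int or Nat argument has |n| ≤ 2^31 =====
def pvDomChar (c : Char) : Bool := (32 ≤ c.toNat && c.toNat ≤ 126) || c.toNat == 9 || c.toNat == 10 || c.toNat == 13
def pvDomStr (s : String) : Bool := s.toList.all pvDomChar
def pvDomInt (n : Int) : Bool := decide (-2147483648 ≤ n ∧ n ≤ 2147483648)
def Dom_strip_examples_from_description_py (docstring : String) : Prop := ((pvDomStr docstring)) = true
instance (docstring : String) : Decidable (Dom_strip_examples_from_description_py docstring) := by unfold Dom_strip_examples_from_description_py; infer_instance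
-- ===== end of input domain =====

-- B replaces A's split-into-lines/collect/join pipeline by a scan of the raw string over
-- line-start positions with a small header-line matcher, cutting the original string once;
-- objective: alternative (no line list or joined copy is built).


-- ===== PORT A =====
-- the `stripped.lower() in ("example:", "examples:", "usage:")` test of A's loop body
def isHeaderLineStr (line : String) : Bool :=
  (["example:", "examples:", "usage:"] : List String).contains
    (PySem.Str.lower (PySem.Str.strip line))

-- A's for-loop with `break`: collects lines into description_lines until a header line
def stripExamplesLoop (lines : List String) (acc : List String) : List String :=
  match lines with
  | [] => acc
  | line :: rest =>
    if isHeaderLineStr line then acc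
    else stripExamplesLoop rest (acc ++ [line])

def strip_examples_from_description_py (docstring : String) : String :=
  let lines := (PySem.Str.split? docstring "\n").getD []  -- split? is some: sep "\n" ≠ ""
  let description_lines := stripExamplesLoop lines []
  PySem.Str.strip (PySem.Str.join "\n" description_lines)

-- ===== PORT B =====
-- Source B's `ws = " \t\r\f\v"` membership test, written on char codes
def wsB (c : Char) : Bool :=
  c.toNat == 32 || c.toNat == 9 || c.toNat == 13 || c.toNat == 12 || c.toNat == 11

-- Source B's trailing `while k < n and docstring[k] in ws` + `k == n or docstring[k] == "\n"` check
def eolOk (x : List Char) : Bool :=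
  match x.dropWhile wsB with
  | [] => true
  | c :: _ => c == '\n'

-- Source B's header_at: skip ws (the while-loop = dropWhile), try each keyword
-- (slice-lowercase-compare = lower of take), then require ws then end-of-line
def headerAt (cs : List Char) : Bool :=
  let rest := cs.dropWhile wsB
  (["example:", "examples:", "usage:"].map String.toList).any fun kw =>
    PySem.Chars.lower (rest.take kw.length) == kw && eolOk (rest.drop kw.length)

-- Source B's scanning while-loop over line starts; `acc` is the reversed consumed prefix
-- (list-tail transcription of the position scan: the jump past the next newline,
-- `find("\n", pos) + 1`, is takeWhile/dropWhile on (· ≠ '\n'))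
def findCut (acc rest : List Char) : Option (List Char) :=
  if headerAt rest then some acc.reverse
  else
    let line := rest.takeWhile (· ≠ '\n')
    match h : rest.dropWhile (· ≠ '\n') with
    | [] => none
    | _ :: r => findCut (('\n' :: line.reverse) ++ acc) r
termination_by rest.length
decreasing_by
  have h1 : (rest.dropWhile (· ≠ '\n')).length ≤ rest.length := rest.length_dropWhile_le _
  rw [h] at h1
  simp at h1 ⊢
  omega

def strip_examples_from_description_py_alt (docstring : String) : String :=
  let cs := docstring.toList
  String.ofList (PySem.Chars.strip
    ((findCut [] cs).getD cs))  -- cut at the header line start; no header: keep the whole string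

-- ===== PRECONDITION & SPEC =====
def Spec_strip_examples_from_description_py (docstring : String) (out : String) : Prop := out = strip_examples_from_description_py_alt docstring
instance (docstring : String) (out : String) : Decidable (Spec_strip_examples_from_description_py docstring out) := by unfold Spec_strip_examples_from_description_py; infer_instance

-- ===== CLAIM (what is proved, stated in full; the proofs are below) =====
def Claim_equal_strip_examples_from_description_py : Prop := ∀ (docstring : String), Dom_strip_examples_from_description_py docstring → Spec_strip_examples_from_description_py docstring (strip_examples_from_description_py docstring)

-- ===== LEMMAS AND PROOFS =====

-- A's header test, on the char-list side
def hB (l : List Char) : Bool :=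
  (["example:", "examples:", "usage:"].map String.toList).contains
    (PySem.Chars.lower (PySem.Chars.strip l))

-- the lines of a char list, as split("\n") produces them
def linesOf (cs : List Char) : List (List Char) :=
  if hd : cs.dropWhile (· ≠ '\n') = [] then [cs.takeWhile (· ≠ '\n')]
  else cs.takeWhile (· ≠ '\n') :: linesOf (cs.dropWhile (· ≠ '\n')).tail
termination_by cs.length
decreasing_by
  have h1 : (cs.dropWhile (· ≠ '\n')).length ≤ cs.length := cs.length_dropWhile_le _
  have h2 : (cs.dropWhile (· ≠ '\n')).length ≠ 0 := by simpa using hd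
  simp only [List.length_tail]
  omega

-- prepend to the head line
def consHead (x : List Char) : List (List Char) → List (List Char)
  | [] => [x]
  | h :: t => (x ++ h) :: t

theorem dropWhile_cons_prop {α : Type} {p : α → Bool} {l t : List α} {c : α}
    (h : l.dropWhile p = c :: t) : p c = false ∧ c ∈ l := by
  induction l with
  | nil => simp at h
  | cons a l ih =>
    rw [List.dropWhile_cons] at h
    by_cases hp : p a
    · rw [if_pos hp] at h
      exact ⟨(ih h).1, List.mem_cons_of_mem _ (ih h).2⟩
    · rw [if_neg hp] at h
      obtain ⟨rfl, -⟩ := List.cons.inj h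
      exact ⟨Bool.not_eq_true _ ▸ hp, List.mem_cons_self⟩

theorem linesOf_ne_nil (cs : List Char) : linesOf cs ≠ [] := by
  rw [linesOf]; split <;> simp

theorem linesOf_nil : linesOf [] = [[]] := by
  rw [linesOf]; simp

theorem linesOf_head_tail (cs : List Char) :
    linesOf cs = cs.takeWhile (· ≠ '\n') :: (linesOf cs).tail := by
  conv_lhs => rw [linesOf]
  conv_rhs => rw [linesOf]
  split <;> simp

theorem consHead_nil (ls : List (List Char)) (h : ls ≠ []) : consHead [] ls = ls := by
  cases ls with
  | nil => exact absurd rfl h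
  | cons a t => simp [consHead]

theorem consHead_consHead (v : List Char) (c : Char) (ls : List (List Char)) :
    consHead v (consHead [c] ls) = consHead (v ++ [c]) ls := by
  cases ls <;> simp [consHead]

theorem linesOf_cons_newline (rest : List Char) :
    linesOf ('\n' :: rest) = [] :: linesOf rest := by
  have h1 : ('\n' :: rest).dropWhile (· ≠ '\n') = '\n' :: rest := by
    rw [List.dropWhile_cons]; simp
  have h2 : ('\n' :: rest).takeWhile (· ≠ '\n') = [] := by
    rw [List.takeWhile_cons]; simp
  rw [linesOf, dif_neg (by rw [h1]; simp), h1, h2, List.tail_cons]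

theorem linesOf_cons_other (c : Char) (rest : List Char) (hc : c ≠ '\n') :
    linesOf (c :: rest) = consHead [c] (linesOf rest) := by
  have h1 : (c :: rest).dropWhile (· ≠ '\n') = rest.dropWhile (· ≠ '\n') := by
    rw [List.dropWhile_cons]; simp [hc]
  have h2 : (c :: rest).takeWhile (· ≠ '\n') = c :: rest.takeWhile (· ≠ '\n') := by
    rw [List.takeWhile_cons]; simp [hc]
  conv_rhs => rw [linesOf]
  conv_lhs => rw [linesOf]
  rw [h1, h2]
  by_cases hdn : rest.dropWhile (· ≠ '\n') = []
  · rw [dif_pos hdn, dif_pos hdn]; simp [consHead]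
  · rw [dif_neg hdn, dif_neg hdn]; simp [consHead]

-- A's break-loop collects exactly the lines before the first header line
theorem stripExamplesLoop_eq_take (lines acc : List String) :
    stripExamplesLoop lines acc = acc ++ lines.take (lines.findIdx isHeaderLineStr) := by
  induction lines generalizing acc with
  | nil => simp [stripExamplesLoop]
  | cons line rest ih =>
    simp only [stripExamplesLoop, List.findIdx_cons]
    by_cases h : isHeaderLineStr line = true
    · simp [h]
    · simp only [Bool.not_eq_true] at h
      simp [h, ih]

-- splitOn's fuelled worker, characterised by linesOf
theorem splitOnGo_eq (fuel : Nat) : ∀ (cs cur : List Char) (accs : List (List Char)),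
    cs.length ≤ fuel →
    PySem.Chars.splitOn.go ['\n'] fuel cs cur accs = accs.reverse ++ consHead cur.reverse (linesOf cs) := by
  induction fuel with
  | zero =>
    intro cs cur accs h
    have : cs = [] := List.length_eq_zero_iff.mp (Nat.le_zero.mp h)
    subst this
    rw [linesOf_nil]
    simp [PySem.Chars.splitOn.go, consHead]
  | succ fuel ih =>
    intro cs cur accs h
    cases cs with
    | nil =>
      rw [linesOf_nil]
      simp [PySem.Chars.splitOn.go, consHead]
    | cons c rest =>
      simp only [List.length_cons, Nat.add_le_add_iff_right] at h
      by_cases hc : c = '\n'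
      · subst hc
        have e1 : PySem.Chars.splitOn.go ['\n'] (fuel+1) ('\n' :: rest) cur accs =
            PySem.Chars.splitOn.go ['\n'] fuel rest [] (cur.reverse :: accs) := by
          simp [PySem.Chars.splitOn.go, List.isPrefixOf]
        rw [e1, ih rest [] (cur.reverse :: accs) h, linesOf_cons_newline]
        simp only [List.reverse_nil]
        rw [consHead_nil _ (linesOf_ne_nil rest)]
        simp [consHead]
      · have e1 : PySem.Chars.splitOn.go ['\n'] (fuel+1) (c :: rest) cur accs =
            PySem.Chars.splitOn.go ['\n'] fuel rest (c :: cur) accs := by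
          simp [PySem.Chars.splitOn.go, List.isPrefixOf, Ne.symm hc]
        rw [e1, ih rest (c :: cur) accs h, linesOf_cons_other c rest hc, consHead_consHead]
        simp

theorem splitOn_eq_linesOf (cs : List Char) :
    PySem.Chars.splitOn cs ['\n'] = linesOf cs := by
  have h := splitOnGo_eq (cs.length + 1) cs [] [] (Nat.le_succ _)
  rw [PySem.Chars.splitOn, h]
  simp only [List.reverse_nil, List.nil_append]
  exact consHead_nil _ (linesOf_ne_nil cs)

-- Source B's ws test agrees with Python's str.strip whitespace on domain chars other than '\n'
theorem wsB_eq_isspace (c : Char) (hd : pvDomChar c = true) (hn : c ≠ '\n') :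
    wsB c = PySem.Chars.isspace c := by
  have h10 : c.toNat ≠ 10 := by
    intro h
    apply hn
    have := Char.ofNat_toNat c
    rw [h] at this
    rw [← this]
  simp only [pvDomChar, Bool.or_eq_true, Bool.and_eq_true, decide_eq_true_eq, beq_iff_eq] at hd
  apply Bool.eq_iff_iff.mpr
  simp only [wsB, PySem.Chars.isspace, Bool.or_eq_true, Bool.and_eq_true, decide_eq_true_eq,
    beq_iff_eq]
  omega

theorem dropWhile_wsB (d : List Char) (h : ∀ c ∈ d, pvDomChar c = true ∧ c ≠ '\n') :
    d.dropWhile wsB = d.dropWhile PySem.Chars.isspace := by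
  induction d with
  | nil => rfl
  | cons a l ih =>
    have ha := h a List.mem_cons_self
    rw [List.dropWhile_cons, List.dropWhile_cons, wsB_eq_isspace a ha.1 ha.2]
    split_ifs with hs
    · exact ih fun c hc => h c (List.mem_cons_of_mem _ hc)
    · rfl

theorem lowerChar_nonspace (x y : Char) (h : PySem.Chars.lowerChar x = y)
    (hy : PySem.Chars.isspace y = false) : PySem.Chars.isspace x = false := by
  by_cases hu : PySem.Chars.isupper x = true
  · simp only [PySem.Chars.isupper, Bool.and_eq_true, decide_eq_true_eq] at hu
    obtain ⟨h1, h2⟩ := hu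
    simp only [Char.le_def, UInt32.le_iff_toNat_le] at h1 h2
    have h1' : 65 ≤ x.val.toNat := h1
    have h2' : x.val.toNat ≤ 90 := h2
    apply Bool.eq_iff_iff.mpr
    simp only [PySem.Chars.isspace, Bool.or_eq_true, Bool.and_eq_true, decide_eq_true_eq,
      Bool.false_eq_true, iff_false, Char.toNat]
    omega
  · rw [PySem.Chars.lowerChar, if_neg hu] at h
    rw [h]
    exact hy

theorem rstrip_append_spaces (a d : List Char) (h : ∀ c ∈ d, PySem.Chars.isspace c = true) :
    PySem.Chars.rstrip (a ++ d) = PySem.Chars.rstrip a := by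
  have hnil : d.reverse.dropWhile PySem.Chars.isspace = [] :=
    List.dropWhile_eq_nil_iff.mpr fun x hx => h x (List.mem_reverse.mp hx)
  simp only [PySem.Chars.rstrip, List.reverse_append, List.dropWhile_append, hnil]
  simp

theorem rstrip_eq_self_of_getLast? (l : List Char) (x : Char) (h : l.getLast? = some x)
    (hx : PySem.Chars.isspace x = false) : PySem.Chars.rstrip l = l := by
  have hh : l.reverse.head? = some x := by rw [List.head?_reverse, h]
  cases hr : l.reverse with
  | nil => rw [hr] at hh; simp at hh
  | cons a t =>
    rw [hr] at hh
    obtain rfl : a = x := by simpa using hh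
    rw [PySem.Chars.rstrip, hr, List.dropWhile_cons, if_neg (by simp [hx])]
    rw [← hr, List.reverse_reverse]

theorem rstrip_decomp (m : List Char) :
    PySem.Chars.rstrip m ++ (m.reverse.takeWhile PySem.Chars.isspace).reverse = m ∧
    ∀ c ∈ (m.reverse.takeWhile PySem.Chars.isspace).reverse, PySem.Chars.isspace c = true := by
  constructor
  · rw [PySem.Chars.rstrip, ← List.reverse_append, List.takeWhile_append_dropWhile,
      List.reverse_reverse]
  · intro c hc
    exact List.mem_takeWhile_imp (List.mem_reverse.mp hc)

theorem rstrip_prefix (m : List Char) : PySem.Chars.rstrip m <+: m := by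
  rw [PySem.Chars.rstrip]
  have h := List.reverse_prefix.mpr
    (List.dropWhile_suffix (l := m.reverse) PySem.Chars.isspace)
  rwa [List.reverse_reverse] at h

theorem length_lower (xs : List Char) : (PySem.Chars.lower xs).length = xs.length := by
  simp [PySem.Chars.lower]

theorem rstrip_eq_take (m : List Char) (k : Nat) (hlen : (PySem.Chars.rstrip m).length = k) :
    PySem.Chars.rstrip m = m.take k := by
  have hp := rstrip_prefix m
  rw [List.prefix_iff_eq_take] at hp
  rw [hp, hlen]

-- the per-keyword step of the matcher, against A's strip/lower comparison
theorem kw_step (kw m tail : List Char)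
    (hnl : '\n' ∉ kw)
    (hlast : ∃ x, kw.getLast? = some x ∧ PySem.Chars.isspace x = false)
    (hm : ∀ c ∈ m, pvDomChar c = true ∧ c ≠ '\n')
    (ht : tail = [] ∨ ∃ r, tail = '\n' :: r) :
    (PySem.Chars.lower ((m ++ tail).take kw.length) == kw
      && eolOk ((m ++ tail).drop kw.length))
      = (PySem.Chars.lower (PySem.Chars.rstrip m) == kw) := by
  by_cases hge : kw.length ≤ m.length
  · rw [List.take_append_of_le_length hge, List.drop_append_of_le_length hge]
    by_cases hx : PySem.Chars.lower (m.take kw.length) = kw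
    · rw [beq_iff_eq.mpr hx, Bool.true_and]
      obtain ⟨x, hxl, hxs⟩ := hlast
      obtain ⟨y, hy, hyx⟩ : ∃ y, (m.take kw.length).getLast? = some y ∧ PySem.Chars.lowerChar y = x := by
        have hgl2 : (PySem.Chars.lower (m.take kw.length)).getLast? = some x := by rw [hx, hxl]
        rw [PySem.Chars.lower, List.getLast?_map] at hgl2
        cases hgl : (m.take kw.length).getLast? with
        | none => rw [hgl] at hgl2; simp at hgl2
        | some y => rw [hgl] at hgl2; exact ⟨y, rfl, by simpa using hgl2⟩
      have hys : PySem.Chars.isspace y = false := lowerChar_nonspace y x hyx hxs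
      have hdrop_mem : ∀ c ∈ m.drop kw.length, pvDomChar c = true ∧ c ≠ '\n' :=
        fun c hc => hm c (List.mem_of_mem_drop hc)
      by_cases hall : ∀ c ∈ m.drop kw.length, PySem.Chars.isspace c = true
      · -- trailing spaces only: both sides true
        have hd1 : (m.drop kw.length).dropWhile wsB = [] := by
          rw [dropWhile_wsB _ hdrop_mem]
          exact List.dropWhile_eq_nil_iff.mpr hall
        have heol : eolOk (m.drop kw.length ++ tail) = true := by
          rw [eolOk, List.dropWhile_append, hd1]
          rcases ht with rfl | ⟨r, rfl⟩
          · simp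
          · have hnw : List.dropWhile wsB ('\n' :: r) = '\n' :: r := by
              rw [List.dropWhile_cons, if_neg (by decide)]
            simp [hnw]
        rw [heol]
        have hrm : PySem.Chars.rstrip m = m.take kw.length := by
          conv_lhs => rw [← List.take_append_drop kw.length m]
          rw [rstrip_append_spaces _ _ hall]
          exact rstrip_eq_self_of_getLast? _ y hy hys
        rw [hrm, beq_iff_eq.mpr hx]
      · -- a non-space after the keyword: both sides false
        obtain ⟨e, t', het⟩ : ∃ e t', (m.drop kw.length).dropWhile PySem.Chars.isspace = e :: t' := by
          cases hh : (m.drop kw.length).dropWhile PySem.Chars.isspace with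
          | nil => exact absurd (List.dropWhile_eq_nil_iff.mp hh) hall
          | cons e t' => exact ⟨e, t', rfl⟩
        obtain ⟨hpe, hme⟩ := dropWhile_cons_prop het
        have heol : eolOk (m.drop kw.length ++ tail) = false := by
          rw [eolOk, List.dropWhile_append, dropWhile_wsB _ hdrop_mem, het]
          simp only [List.isEmpty_cons, Bool.false_eq_true, if_false, List.cons_append]
          exact beq_eq_false_iff_ne.mpr (hdrop_mem e hme).2
        rw [heol]
        symm
        rw [beq_eq_false_iff_ne]
        intro hrw
        have hlen : (PySem.Chars.rstrip m).length = kw.length := by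
          have hc := congrArg List.length hrw
          rwa [length_lower] at hc
        have hrt := rstrip_eq_take m kw.length hlen
        obtain ⟨hdec, hsp⟩ := rstrip_decomp m
        rw [hrt] at hdec
        have hdr : m.drop kw.length = (m.reverse.takeWhile PySem.Chars.isspace).reverse := by
          apply List.append_cancel_left (as := m.take kw.length)
          rw [List.take_append_drop, hdec]
        have hsp2 := hsp e (hdr ▸ hme)
        rw [hpe] at hsp2
        exact Bool.false_ne_true hsp2
    · rw [beq_eq_false_iff_ne.mpr hx, Bool.false_and]
      symm
      rw [beq_eq_false_iff_ne]
      intro hrw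
      have hlen : (PySem.Chars.rstrip m).length = kw.length := by
        have hc := congrArg List.length hrw
        rwa [length_lower] at hc
      rw [rstrip_eq_take m kw.length hlen] at hrw
      exact hx hrw
  · rw [Nat.not_le] at hge
    have hr : (PySem.Chars.lower (PySem.Chars.rstrip m) == kw) = false := by
      rw [beq_eq_false_iff_ne]
      intro h
      have hc := congrArg List.length h
      rw [length_lower] at hc
      have := (rstrip_prefix m).length_le
      omega
    rw [hr]
    rcases ht with rfl | ⟨r, rfl⟩
    · simp only [List.append_nil]
      rw [List.take_of_length_le (le_of_lt hge)]
      have hfalse : (PySem.Chars.lower m == kw) = false := by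
        rw [beq_eq_false_iff_ne]
        intro h
        have hc := congrArg List.length h
        rw [length_lower] at hc
        omega
      rw [hfalse, Bool.false_and]
    · have hmem : '\n' ∈ (m ++ '\n' :: r).take kw.length := by
        rw [List.take_append]
        obtain ⟨j, hj⟩ : ∃ j, kw.length - m.length = j + 1 := ⟨kw.length - m.length - 1, by omega⟩
        rw [hj, List.take_succ_cons]
        exact List.mem_append_right _ List.mem_cons_self
      have hfalse : (PySem.Chars.lower ((m ++ '\n' :: r).take kw.length) == kw) = false := by
        rw [beq_eq_false_iff_ne]
        intro h
        apply hnl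
        rw [← h, PySem.Chars.lower]
        have hl : PySem.Chars.lowerChar '\n' = '\n' := rfl
        exact hl ▸ List.mem_map_of_mem hmem
      rw [hfalse, Bool.false_and]

-- the header matcher, applied at a line start, is A's stripped/lowered membership test
theorem headerAt_eq (l tail : List Char) (hd : ∀ c ∈ l, pvDomChar c = true)
    (hn : '\n' ∉ l) (ht : tail = [] ∨ ∃ r, tail = '\n' :: r) :
    headerAt (l ++ tail) = hB l := by
  have hml : ∀ c ∈ l, pvDomChar c = true ∧ c ≠ '\n' := fun c hc => ⟨hd c hc, fun e => hn (e ▸ hc)⟩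
  have hdw : List.dropWhile wsB l = PySem.Chars.lstrip l := by
    rw [dropWhile_wsB l hml]; rfl
  have htail : List.dropWhile wsB tail = tail := by
    rcases ht with rfl | ⟨r, rfl⟩
    · rfl
    · rw [List.dropWhile_cons, if_neg (by decide)]
  have hrest : List.dropWhile wsB (l ++ tail) = PySem.Chars.lstrip l ++ tail := by
    rw [List.dropWhile_append]
    by_cases he : (List.dropWhile wsB l).isEmpty
    · rw [if_pos he, htail]
      rw [← hdw, List.isEmpty_iff.mp he]
      rfl
    · rw [if_neg he, hdw]
  have hm : ∀ c ∈ PySem.Chars.lstrip l, pvDomChar c = true ∧ c ≠ '\n' :=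
    fun c hc => hml c ((List.dropWhile_suffix _).subset hc)
  have hstrip : PySem.Chars.strip l = PySem.Chars.rstrip (PySem.Chars.lstrip l) := rfl
  simp only [headerAt, hB, hrest, List.map_cons, List.map_nil, List.any_cons, List.any_nil,
    List.contains_cons, List.contains_nil, Bool.or_false, hstrip]
  rw [kw_step "example:".toList _ tail (by decide) ⟨':', by decide, by decide⟩ hm ht,
    kw_step "examples:".toList _ tail (by decide) ⟨':', by decide, by decide⟩ hm ht,
    kw_step "usage:".toList _ tail (by decide) ⟨':', by decide, by decide⟩ hm ht]

theorem takeWhile_dom (cs : List Char) (hd : ∀ c ∈ cs, pvDomChar c = true) :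
    ∀ c ∈ cs.takeWhile (· ≠ '\n'), pvDomChar c = true :=
  fun c hc => hd c ((List.takeWhile_prefix _).subset hc)

theorem takeWhile_no_newline (cs : List Char) : '\n' ∉ cs.takeWhile (· ≠ '\n') :=
  fun hc => by simpa using List.mem_takeWhile_imp hc

theorem dropWhile_shape (cs : List Char) :
    cs.dropWhile (· ≠ '\n') = [] ∨ ∃ r, cs.dropWhile (· ≠ '\n') = '\n' :: r := by
  cases hdw : cs.dropWhile (· ≠ '\n') with
  | nil => exact Or.inl rfl
  | cons e r =>
    refine Or.inr ⟨r, ?_⟩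
    have he := (dropWhile_cons_prop hdw).1
    simp only [ne_eq, decide_not, Bool.not_eq_false', decide_eq_true_eq] at he
    rw [he]

theorem headerAt_head (cs : List Char) (hd : ∀ c ∈ cs, pvDomChar c = true) :
    headerAt cs = hB (cs.takeWhile (· ≠ '\n')) := by
  conv_lhs => rw [← List.takeWhile_append_dropWhile (p := (· ≠ '\n')) (l := cs)]
  exact headerAt_eq _ _ (takeWhile_dom cs hd) (takeWhile_no_newline cs) (dropWhile_shape cs)

-- the scan finds (the prefix before) the first header line
theorem findCut_eq (acc cs : List Char) :
    (∀ c ∈ cs, pvDomChar c = true) →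
    findCut acc cs =
      (if (linesOf cs).findIdx hB = (linesOf cs).length then none
       else some (acc.reverse ++
         (((linesOf cs).take ((linesOf cs).findIdx hB)).flatMap (· ++ ['\n'])))) := by
  fun_induction findCut acc cs with
  | case1 acc cs hh =>
    intro hd
    have hB0 : hB (cs.takeWhile (· ≠ '\n')) = true := by
      rw [← headerAt_head cs hd]; exact hh
    rw [linesOf_head_tail, List.findIdx_cons, hB0]
    simp only [cond_true, List.length_cons]
    rw [if_neg (by omega)]
    simp
  | case2 acc cs hh hdw =>
    intro hd
    have hB0 : hB (cs.takeWhile (· ≠ '\n')) = false := by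
      rw [← headerAt_head cs hd]; simpa using hh
    rw [linesOf, dif_pos hdw, List.findIdx_cons, hB0]
    norm_num
  | case3 acc cs hh line e r hdw ih =>
    intro hd
    have hsub : ∀ c ∈ r, pvDomChar c = true := by
      intro c hc
      exact hd c ((List.dropWhile_suffix (· ≠ '\n')).subset (hdw ▸ List.mem_cons_of_mem e hc))
    have hB0 : hB (cs.takeWhile (· ≠ '\n')) = false := by
      rw [← headerAt_head cs hd]; simpa using hh
    have he : e = '\n' := by
      have hp := (dropWhile_cons_prop hdw).1
      simpa using hp
    have hne : ¬ cs.dropWhile (· ≠ '\n') = [] := by rw [hdw]; simp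
    rw [ih hsub]
    conv_rhs => rw [linesOf, dif_neg hne, hdw, List.tail_cons]
    rw [List.findIdx_cons, hB0]
    simp only [cond_false, List.length_cons]
    by_cases hj : (linesOf r).findIdx hB = (linesOf r).length
    · rw [if_pos hj, if_pos (by omega)]
    · rw [if_neg hj, if_neg (by omega), List.take_succ_cons, List.flatMap_cons]
      simp [List.append_assoc]
      show List.takeWhile (fun x => decide (x ≠ '\n')) cs = _
      congr 1
      funext x
      simp

-- joining the lines back gives the original string
theorem join_linesOf (cs : List Char) :
    PySem.Chars.join ['\n'] (linesOf cs) = cs := by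
  fun_induction linesOf cs with
  | case1 cs hdw =>
    rw [PySem.Chars.join_singleton]
    conv_rhs => rw [← List.takeWhile_append_dropWhile (p := (· ≠ '\n')) (l := cs)]
    rw [hdw]
    simp
  | case2 cs hdw ih =>
    obtain ⟨e, r, her⟩ : ∃ e r, cs.dropWhile (· ≠ '\n') = e :: r := by
      cases h : cs.dropWhile (· ≠ '\n') with
      | nil => exact absurd h hdw
      | cons e r => exact ⟨e, r, rfl⟩
    have he : e = '\n' := by
      have hp := (dropWhile_cons_prop her).1
      simpa using hp
    obtain ⟨a, t, hat⟩ : ∃ a t, linesOf (cs.dropWhile (· ≠ '\n')).tail = a :: t := by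
      cases h : linesOf (cs.dropWhile (· ≠ '\n')).tail with
      | nil => exact absurd h (linesOf_ne_nil _)
      | cons a t => exact ⟨a, t, rfl⟩
    rw [hat, PySem.Chars.join_cons_cons, ← hat, ih]
    conv_rhs => rw [← List.takeWhile_append_dropWhile (p := (· ≠ '\n')) (l := cs)]
    rw [her, he, List.tail_cons]
    simp

theorem flatMap_nl (ls : List (List Char)) (h : ls ≠ []) :
    ls.flatMap (· ++ ['\n']) = PySem.Chars.join ['\n'] ls ++ ['\n'] := by
  induction ls with
  | nil => exact absurd rfl h
  | cons x t ih =>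
    cases t with
    | nil => simp [PySem.Chars.join_singleton]
    | cons y t' =>
      rw [List.flatMap_cons, ih (by simp), PySem.Chars.join_cons_cons]
      simp [List.append_assoc]

-- strip swallows a trailing space character
theorem strip_append_space (xs : List Char) (c : Char) (h : PySem.Chars.isspace c = true) :
    PySem.Chars.strip (xs ++ [c]) = PySem.Chars.strip xs := by
  by_cases h0 : xs.dropWhile PySem.Chars.isspace = []
  · have h1 : PySem.Chars.lstrip (xs ++ [c]) = [] := by
      rw [PySem.Chars.lstrip, List.dropWhile_append, h0]
      simp [h]
    rw [PySem.Chars.strip, h1, PySem.Chars.strip, PySem.Chars.lstrip, h0]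
  · rw [PySem.Chars.strip, PySem.Chars.strip, PySem.Chars.lstrip, PySem.Chars.lstrip,
      List.dropWhile_append, if_neg (by simpa [List.isEmpty_iff] using h0)]
    exact rstrip_append_spaces _ [c] (by simpa using h)

theorem ofList_beq (x : List Char) (s : String) : (String.ofList x == s) = (x == s.toList) := by
  apply Bool.eq_iff_iff.mpr
  simp only [beq_iff_eq]
  constructor
  · intro h; rw [← h, String.toList_ofList]
  · intro h; rw [h, String.ofList_toList]

theorem isHeaderLineStr_ofList (l : List Char) :
    isHeaderLineStr (String.ofList l) = hB l := by
  simp only [isHeaderLineStr, hB]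
  have h1 : PySem.Str.lower (PySem.Str.strip (String.ofList l)) =
      String.ofList (PySem.Chars.lower (PySem.Chars.strip l)) := by
    simp [PySem.Str.lower, PySem.Str.strip, String.toList_ofList]
  rw [h1]
  simp only [List.map_cons, List.map_nil, List.contains_cons, List.contains_nil, ofList_beq]

theorem findIdx_lines (ls : List (List Char)) :
    List.findIdx isHeaderLineStr (ls.map String.ofList) = List.findIdx hB ls := by
  induction ls with
  | nil => rfl
  | cons a t ih =>
    rw [List.map_cons, List.findIdx_cons, List.findIdx_cons, isHeaderLineStr_ofList a, ih]

-- ===== VERDICT (by name: the statement is the Claim_ definition above) =====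
set_option maxHeartbeats 1000000 in
theorem strip_examples_from_description_py_spec : Claim_equal_strip_examples_from_description_py := by
  intro docstring hdom
  have hd : ∀ c ∈ docstring.toList, pvDomChar c = true := by
    unfold Dom_strip_examples_from_description_py pvDomStr at hdom
    simpa [List.all_eq_true] using hdom
  unfold Spec_strip_examples_from_description_py
  simp only [strip_examples_from_description_py, strip_examples_from_description_py_alt]
  rw [findCut_eq [] docstring.toList hd]
  have hsplit : (PySem.Str.split? docstring "\n").getD [] =
      (linesOf docstring.toList).map String.ofList := by
    rw [PySem.Str.split?, PySem.Chars.split?]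
    have hsep : ("\n" : String).toList = ['\n'] := by decide
    rw [hsep]
    simp [splitOn_eq_linesOf]
  rw [hsplit, stripExamplesLoop_eq_take, List.nil_append, findIdx_lines, ← List.map_take]
  rw [PySem.Str.strip, PySem.Str.join]
  have hsep : ("\n" : String).toList = ['\n'] := by decide
  rw [hsep, String.toList_ofList, List.map_map]
  have hmap : ∀ (zs : List (List Char)), zs.map (String.toList ∘ String.ofList) = zs := by
    intro zs
    simp [Function.comp_def, String.toList_ofList]
  rw [hmap]
  apply congrArg String.ofList
  by_cases hc : (linesOf docstring.toList).findIdx hB = (linesOf docstring.toList).length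
  · rw [if_pos hc, Option.getD_none, hc, List.take_length, join_linesOf]
  · rw [if_neg hc, Option.getD_some]
    simp only [List.reverse_nil, List.nil_append]
    by_cases h0 : (linesOf docstring.toList).take ((linesOf docstring.toList).findIdx hB) = []
    · rw [h0]
      simp [PySem.Chars.join_nil]
    · rw [flatMap_nl _ h0, strip_append_space _ _ (by decide)]
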